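-- pv_equiv track=rewrite | github.com/UBCSamSung/Pixel-Puzzle-Solver | solver_B.py | negative_deduce
-- ===== SOURCE A (Python) =====
-- def negative_deduce(n, rowHints, colHints):
--     atoms=set()
--     for axis, hints in enumerate([colHints, rowHints]):
--         for index, hint in enumerate(hints):
--             m=max(hint)
--             if m==0:
--                 for i in range(n):
--                     atoms.add((i,index) if axis==0 else (index,i))
--     return atoms
-- ===== SOURCE B (Python) =====
-- def negative_deduce(n, rowHints, colHints):
--     def cells(hints, k, make):
--         if not hints:
--             return []
--         first = [make(i, k) for i in range(n)] if max(hints[0]) == 0 else []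
--         return first + cells(hints[1:], k + 1, make)
--     return set(cells(colHints, 0, lambda i, j: (i, j)) +
--                cells(rowHints, 0, lambda i, r: (r, i)))
-- ===== Notes on version B (the rewrite author's own statement) =====
-- stated objective: alternative
-- what changed: A iterates both axes under an axis flag and inserts every cell into a set one by one; B is a structural recursion over a single hint list (parameterised by a coordinate-making function and a running index) that builds each axis's cell list front-to-back and deduplicates the one concatenated list at the end.
import Mathlib
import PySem

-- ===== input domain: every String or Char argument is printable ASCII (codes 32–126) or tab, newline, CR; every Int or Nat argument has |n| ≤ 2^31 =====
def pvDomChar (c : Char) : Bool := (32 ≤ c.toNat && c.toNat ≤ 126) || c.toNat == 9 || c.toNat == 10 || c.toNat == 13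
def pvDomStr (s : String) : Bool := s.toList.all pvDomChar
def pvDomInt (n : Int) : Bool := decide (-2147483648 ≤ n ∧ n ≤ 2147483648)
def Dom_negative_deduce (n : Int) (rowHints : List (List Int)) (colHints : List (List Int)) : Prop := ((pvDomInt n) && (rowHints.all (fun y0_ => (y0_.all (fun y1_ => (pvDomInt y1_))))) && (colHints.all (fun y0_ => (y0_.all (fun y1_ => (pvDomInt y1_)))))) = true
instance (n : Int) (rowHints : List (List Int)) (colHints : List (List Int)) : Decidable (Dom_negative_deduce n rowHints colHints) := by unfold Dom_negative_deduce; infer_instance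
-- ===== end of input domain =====

-- B replaces A's axis-flagged iteration that inserts cells into a set one by one with a
-- structural recursion over one hint list (running index + coordinate-making function),
-- deduplicating the single concatenated cell list once at the end (objective: alternative).

-- ===== PORT A =====
-- the body of A's outer loop: one axis (ax = 0 → columns, ax = 1 → rows)
def pvAxisLoop (n : Int) (ax : Int) (hints : List (List Int)) (atoms : PySem.Set (Int × Int)) : PySem.Set (Int × Int) :=
  (PySem.List.enumerate hints).foldl (fun atoms ih =>
    let m := (PySem.List.max? ih.2 (fun x => x)).getD 0
    if m = 0 then
      (PySem.List.pyRange 0 n 1).foldl (fun atoms i =>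
        PySem.Set.add atoms (if ax = 0 then (i, ih.1) else (ih.1, i))) atoms
    else atoms) atoms

def negative_deduce (n : Int) (rowHints : List (List Int)) (colHints : List (List Int)) : List (Int × Int) :=
  (PySem.List.enumerate [colHints, rowHints]).foldl
    (fun atoms ah => pvAxisLoop n ah.1 ah.2 atoms)
    (PySem.Set.empty : PySem.Set (Int × Int))

-- ===== PORT B =====
-- B's inner recursion 'cells(hints, k, make)'
def pvCells (n : Int) (k : Int) (make : Int → Int → Int × Int) : List (List Int) → List (Int × Int)
  | [] => []
  | h :: t =>
      (if (PySem.List.max? h (fun x => x)).getD 0 = 0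
         then (PySem.List.pyRange 0 n 1).map (fun i => make i k)
         else [])
      ++ pvCells n (k + 1) make t

def negative_deduce_alt (n : Int) (rowHints : List (List Int)) (colHints : List (List Int)) : List (Int × Int) :=
  PySem.Set.ofList
    (pvCells n 0 (fun i j => (i, j)) colHints ++ pvCells n 0 (fun i r => (r, i)) rowHints)

-- ===== PRECONDITION & SPEC =====
-- Pre_ excludes inputs containing an empty hint list, on which Python A raises ValueError (max([])).
def Pre_negative_deduce (n : Int) (rowHints : List (List Int)) (colHints : List (List Int)) : Prop :=
  (∀ h ∈ rowHints, h ≠ []) ∧ (∀ h ∈ colHints, h ≠ [])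
instance (n : Int) (rowHints : List (List Int)) (colHints : List (List Int)) : Decidable (Pre_negative_deduce n rowHints colHints) := by unfold Pre_negative_deduce; infer_instance

def pvWitness_negative_deduce : Int × List (List Int) × List (List Int) := (2, [[0], [1]], [[1], [0]])

def Spec_negative_deduce (n : Int) (rowHints : List (List Int)) (colHints : List (List Int)) (out : List (Int × Int)) : Prop := out = negative_deduce_alt n rowHints colHints
instance (n : Int) (rowHints : List (List Int)) (colHints : List (List Int)) (out : List (Int × Int)) : Decidable (Spec_negative_deduce n rowHints colHints out) := by unfold Spec_negative_deduce; infer_instance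

-- ===== CLAIM (what is proved, stated in full; the proofs are below) =====
def Claim_equal_negative_deduce : Prop := ∀ (n : Int) (rowHints : List (List Int)) (colHints : List (List Int)), Dom_negative_deduce n rowHints colHints → Pre_negative_deduce n rowHints colHints → Spec_negative_deduce n rowHints colHints (negative_deduce n rowHints colHints)

-- ===== LEMMAS AND PROOFS =====

-- a loop that, when p x holds, folds f over g x equals the fold of f over the filtered flatMap
theorem pv_foldl_if_flat {α β γ : Type} (l : List α) (p : α → Prop) [DecidablePred p]
    (g : α → List β) (f : γ → β → γ) (init : γ) :
    l.foldl (fun s x => if p x then (g x).foldl f s else s) init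
      = ((l.filter (fun x => decide (p x))).flatMap g).foldl f init := by
  induction l generalizing init with
  | nil => rfl
  | cons a t ih =>
      by_cases h : p a <;>
        simp [h, List.foldl_append, ih]

-- one axis of A's loop is the fold of Set.add over the flat list of that axis's cells
theorem pv_axis_eq (n ax : Int) (hints : List (List Int)) (s : PySem.Set (Int × Int)) :
    pvAxisLoop n ax hints s
      = (((PySem.List.enumerate hints).filter
            (fun p => decide ((PySem.List.max? p.2 (fun x => x)).getD 0 = 0))).flatMap
          (fun ih => (PySem.List.pyRange 0 n 1).map
            (fun i => if ax = 0 then (i, ih.1) else (ih.1, i)))).foldl PySem.Set.add s := by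
  unfold pvAxisLoop
  have h : (fun (atoms : PySem.Set (Int × Int)) (ih : Int × List Int) =>
      let m := (PySem.List.max? ih.2 (fun x => x)).getD 0
      if m = 0 then
        (PySem.List.pyRange 0 n 1).foldl (fun atoms i =>
          PySem.Set.add atoms (if ax = 0 then (i, ih.1) else (ih.1, i))) atoms
      else atoms)
    = (fun atoms ih =>
        if (PySem.List.max? ih.2 (fun x => x)).getD 0 = 0 then
          ((PySem.List.pyRange 0 n 1).map
            (fun i => if ax = 0 then (i, ih.1) else (ih.1, i))).foldl PySem.Set.add atoms
        else atoms) := by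
    funext atoms ih
    simp [List.foldl_map]
  rw [h, pv_foldl_if_flat]

-- B's recursion computes exactly the flat cell list of one axis (enumerate started at k)
theorem pv_cells_eq (n k : Int) (make : Int → Int → Int × Int) (hints : List (List Int)) :
    pvCells n k make hints
      = (((PySem.List.enumerate hints k).filter
            (fun p => decide ((PySem.List.max? p.2 (fun x => x)).getD 0 = 0))).flatMap
          (fun ih => (PySem.List.pyRange 0 n 1).map (fun i => make i ih.1))) := by
  induction hints generalizing k with
  | nil => rfl
  | cons h t ih =>
      by_cases hz : (PySem.List.max? h (fun x => x)).getD 0 = 0 <;>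
        simp [pvCells, PySem.List.enumerate_cons, hz, ih]

-- ===== VERDICT (by name: the statement is the Claim_ definition above) =====
theorem negative_deduce_spec : Claim_equal_negative_deduce := by
  intro n rowHints colHints _ _
  unfold Spec_negative_deduce negative_deduce negative_deduce_alt
  simp only [PySem.List.enumerate_cons, PySem.List.enumerate_nil, List.foldl_cons, List.foldl_nil]
  rw [pv_axis_eq, pv_axis_eq, PySem.Set.ofList_eq_foldl, pv_cells_eq, pv_cells_eq,
      List.foldl_append]
  norm_num
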